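-- pv_equiv track=rewrite | github.com/AcademySoftwareFoundation/ori-shared-platform | rpa/session_state/utils.py | insert_list_into_list
-- ===== SOURCE A (Python) =====
-- def insert_list_into_list(main_list, list_to_insert, index):
--     out = []
--     if len(main_list) == 0:
--         out = list_to_insert
--     elif index >= len(main_list):
--         out = main_list + list_to_insert
--     elif index < 0:
--         out = list_to_insert + main_list
--     else:
--         for i, source_group in enumerate(main_list):
--             if i == index:
--                 out.extend(list_to_insert)
--             out.append(source_group)
--     return out
-- ===== SOURCE B (Python) =====
-- def insert_list_into_list(main_list, list_to_insert, index):
--     k = min(max(index, 0), len(main_list))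
--     return main_list[:k] + list_to_insert + main_list[k:]
-- ===== Notes on version B (the rewrite author's own statement) =====
-- stated objective: simpler
-- what changed: Replaces the four-way branch with enumerate loop by one clamped insertion point k and a single slice concatenation main[:k] + ins + main[k:].
import Mathlib
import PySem

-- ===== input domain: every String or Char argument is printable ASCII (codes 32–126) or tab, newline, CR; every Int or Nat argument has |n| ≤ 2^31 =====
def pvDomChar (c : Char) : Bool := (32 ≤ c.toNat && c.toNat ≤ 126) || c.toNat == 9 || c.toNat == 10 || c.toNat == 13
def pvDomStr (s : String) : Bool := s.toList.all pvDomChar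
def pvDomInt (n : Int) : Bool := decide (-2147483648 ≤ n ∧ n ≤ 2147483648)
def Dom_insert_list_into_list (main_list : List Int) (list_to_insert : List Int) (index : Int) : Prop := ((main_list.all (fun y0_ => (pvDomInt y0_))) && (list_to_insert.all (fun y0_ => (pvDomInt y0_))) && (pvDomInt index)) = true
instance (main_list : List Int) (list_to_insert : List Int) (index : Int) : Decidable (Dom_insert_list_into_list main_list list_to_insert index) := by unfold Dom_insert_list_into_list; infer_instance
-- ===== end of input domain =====

-- ===== PORT A =====
-- Port of A: same branch order; the enumerate loop is a foldl over PySem.List.enumerate.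
def insert_list_into_list (main_list : List Int) (list_to_insert : List Int) (index : Int) : List Int :=
  if main_list.length = 0 then list_to_insert
  else if index ≥ (main_list.length : Int) then main_list ++ list_to_insert
  else if index < 0 then list_to_insert ++ main_list
  else
    (PySem.List.enumerate main_list 0).foldl
      (fun out p => (if p.1 = index then out ++ list_to_insert else out) ++ [p.2]) []

-- ===== PORT B =====
-- Port of B: clamp the index, then one slice concatenation (Source B's slices via PySem.List.slice).
def insert_list_into_list_alt (main_list : List Int) (list_to_insert : List Int) (index : Int) : List Int :=
  let k : Int := min (max index 0) (main_list.length : Int)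
  PySem.List.slice main_list none (some k) ++ list_to_insert ++ PySem.List.slice main_list (some k) none

-- ===== PRECONDITION & SPEC =====
def Spec_insert_list_into_list (main_list : List Int) (list_to_insert : List Int) (index : Int) (out : List Int) : Prop := out = insert_list_into_list_alt main_list list_to_insert index
instance (main_list : List Int) (list_to_insert : List Int) (index : Int) (out : List Int) : Decidable (Spec_insert_list_into_list main_list list_to_insert index out) := by unfold Spec_insert_list_into_list; infer_instance

-- ===== CLAIM (what is proved, stated in full; the proofs are below) =====
def Claim_equal_insert_list_into_list : Prop := ∀ (main_list : List Int) (list_to_insert : List Int) (index : Int), Dom_insert_list_into_list main_list list_to_insert index → Spec_insert_list_into_list main_list list_to_insert index (insert_list_into_list main_list list_to_insert index)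

-- ===== LEMMAS AND PROOFS =====

lemma fold_enum_insert (ins : List Int) (idx : Int) :
    ∀ (xs acc : List Int) (s : Int),
    (PySem.List.enumerate xs s).foldl
        (fun out p => (if p.1 = idx then out ++ ins else out) ++ [p.2]) acc
    = acc ++ (if s ≤ idx ∧ idx < s + xs.length then
        xs.take (idx - s).toNat ++ ins ++ xs.drop (idx - s).toNat else xs) := by
  intro xs
  induction xs with
  | nil =>
    intro acc s
    simp [PySem.List.enumerate_nil]
  | cons x xs ih =>
    intro acc s
    rw [PySem.List.enumerate_cons, List.foldl_cons, ih]
    by_cases h : s = idx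
    · subst h
      have h1 : ¬ (s + 1 ≤ s) := by omega
      simp [h1, List.append_assoc]
    · by_cases h3 : s < idx
      · have hk : (idx - s).toNat = (idx - (s+1)).toNat + 1 := by omega
        by_cases h4 : idx < s + 1 + (xs.length : Int)
        · have c1 : s + 1 ≤ idx ∧ idx < s + 1 + (xs.length : Int) := ⟨by omega, h4⟩
          have c2 : s ≤ idx ∧ idx < s + ((x :: xs).length : Int) := by
            simp [List.length_cons]; constructor; omega; omega
          simp only [h]
          rw [if_pos c1, if_pos c2, hk]
          simp [List.take_succ_cons, List.drop_succ_cons, List.append_assoc]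
        · have c1 : ¬ (s + 1 ≤ idx ∧ idx < s + 1 + (xs.length : Int)) := by
            intro hc; exact h4 hc.2
          have c2 : ¬ (s ≤ idx ∧ idx < s + ((x :: xs).length : Int)) := by
            simp [List.length_cons]; intro _; omega
          rw [if_neg c1, if_neg c2]
          simp [h, List.append_assoc]
      · have c1 : ¬ (s + 1 ≤ idx ∧ idx < s + 1 + (xs.length : Int)) := by
          intro hc; omega
        have c2 : ¬ (s ≤ idx ∧ idx < s + ((x :: xs).length : Int)) := by
          intro hc; exact h3 (lt_of_le_of_ne hc.1 h)
        rw [if_neg c1, if_neg c2]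
        simp [h, List.append_assoc]

-- ===== VERDICT (by name: the statement is the Claim_ definition above) =====
theorem insert_list_into_list_spec : Claim_equal_insert_list_into_list := by
  intro main ins idx _
  unfold Spec_insert_list_into_list insert_list_into_list insert_list_into_list_alt
  by_cases h0 : main.length = 0
  · have : main = [] := List.length_eq_zero_iff.mp h0
    subst this
    simp [PySem.List.slice]
  · rw [if_neg h0]
    by_cases h1 : idx ≥ (main.length : Int)
    · have hk : min (max idx 0) (main.length : Int) = (main.length : Int) := by omega
      rw [if_pos h1]
      simp only [hk, PySem.List.slice_to_natCast, PySem.List.slice_from_natCast]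
      simp
    · rw [if_neg h1]
      by_cases h2 : idx < 0
      · have hk : min (max idx 0) (main.length : Int) = ((0 : Nat) : Int) := by
          simp; omega
        rw [if_pos h2]
        simp only [hk, PySem.List.slice_to_natCast, PySem.List.slice_from_natCast]
        simp
      · rw [if_neg h2]
        have hk : min (max idx 0) (main.length : Int) = ((idx.toNat : Nat) : Int) := by omega
        rw [fold_enum_insert]
        have hc : (0:Int) ≤ idx ∧ idx < 0 + (main.length : Int) := ⟨by omega, by omega⟩
        rw [if_pos hc]
        simp only [hk, PySem.List.slice_to_natCast, PySem.List.slice_from_natCast]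
        simp
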